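-- pv_equiv track=rewrite | github.com/leele2/Selenium-Lichess-Bot | src/chess_functions.py | ASCII_to_FEN
-- ===== SOURCE A (Python) =====
-- def ASCII_to_FEN(board:list):
--     '''
--     Function to convert ascii board into FEN
--     '''
--     FEN = []
--     for row in board:
--         store = [] #temporary list to collect FEN parts for a row
--         num = 0 #count empty squares in row
--         for column in row:
--             # element is a . at 1 to count of empty squares
--             if column == ".":
--                 num = num + 1
--                 continue
--             # otherwise append piece and its number of empty squares
--             # if number of empty squares is not 0
--             else:
--                 if not num == 0:
--                     store.append(str(num))
--                 store.append(column)
--                 num = 0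
--         # append number of empty squares to the end of row
--         if not num == 0:
--             store.append(str(num))
--         # save row info as list element
--         FEN.append("".join(store))
--     #join all elements by a / to indicate a break in the rows per FEN
--     return "/".join(FEN)
-- ===== SOURCE B (Python) =====
-- from itertools import groupby
--
-- def ASCII_to_FEN(board: list):
--     rows = []
--     for row in board:
--         parts = []
--         for is_empty, grp in groupby(row, key=lambda c: c == "."):
--             g = list(grp)
--             parts.append(str(len(g)) if is_empty else "".join(g))
--         rows.append("".join(parts))
--     return "/".join(rows)
-- ===== Notes on version B (the rewrite author's own statement) =====
-- stated objective: idiomatic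
-- what changed: Replaces the char-by-char empty-square counter with flush logic by an itertools.groupby traversal over maximal runs: a dot-run becomes its length, any other run is joined verbatim.
import Mathlib
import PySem

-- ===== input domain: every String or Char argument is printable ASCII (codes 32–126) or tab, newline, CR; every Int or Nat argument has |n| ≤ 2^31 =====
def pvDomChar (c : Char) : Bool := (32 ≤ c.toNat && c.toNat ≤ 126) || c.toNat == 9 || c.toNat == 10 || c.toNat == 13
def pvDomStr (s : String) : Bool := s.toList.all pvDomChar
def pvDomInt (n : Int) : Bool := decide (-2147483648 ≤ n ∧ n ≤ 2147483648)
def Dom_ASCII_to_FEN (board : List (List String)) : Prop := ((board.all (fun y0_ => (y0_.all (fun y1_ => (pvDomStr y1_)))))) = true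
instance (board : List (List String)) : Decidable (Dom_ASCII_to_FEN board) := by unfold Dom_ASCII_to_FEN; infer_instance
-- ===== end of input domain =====

-- B replaces A's char-by-char empty-square counter/flush loop with an itertools.groupby
-- traversal over maximal runs (objective: idiomatic; same asymptotic cost).

-- ===== PORT A =====
def ASCII_to_FEN (board : List (List String)) : String :=
  let FEN := board.foldl (fun FEN row =>
    let sn := row.foldl (fun (sn : List String × Int) column =>
      if column == "." then (sn.1, sn.2 + 1)
      else
        let store := if ¬ sn.2 = 0 then sn.1 ++ [PySem.Int.toStr sn.2] else sn.1
        (store ++ [column], 0)) ([], 0)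
    let store := if ¬ sn.2 = 0 then sn.1 ++ [PySem.Int.toStr sn.2] else sn.1
    FEN ++ [PySem.Str.join "" store]) []
  PySem.Str.join "/" FEN

-- ===== PORT B =====
-- itertools.groupby(row, key = fun c => c == ".") : maximal runs of equal key
def pyRuns (l : List String) : List (List String) :=
  match l with
  | [] => []
  | x :: xs =>
      (x :: xs.takeWhile (fun y => (y == ".") == (x == "."))) ::
        pyRuns (xs.dropWhile (fun y => (y == ".") == (x == ".")))
termination_by l.length
decreasing_by
  simp only [List.length_cons]
  exact Nat.lt_succ_of_le (List.length_dropWhile_le _ _)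

def ASCII_to_FEN_alt (board : List (List String)) : String :=
  PySem.Str.join "/" (board.map (fun row =>
    PySem.Str.join "" ((pyRuns row).map (fun g =>
      if (g.headD "") == "." then PySem.Int.toStr (g.length : Int)
      else PySem.Str.join "" g))))

-- ===== PRECONDITION & SPEC =====
def Spec_ASCII_to_FEN (board : List (List String)) (out : String) : Prop := out = ASCII_to_FEN_alt board
instance (board : List (List String)) (out : String) : Decidable (Spec_ASCII_to_FEN board out) := by unfold Spec_ASCII_to_FEN; infer_instance

-- ===== CLAIM (what is proved, stated in full; the proofs are below) =====
def Claim_equal_ASCII_to_FEN : Prop := ∀ (board : List (List String)), Dom_ASCII_to_FEN board → Spec_ASCII_to_FEN board (ASCII_to_FEN board)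

-- ===== LEMMAS AND PROOFS =====

-- A's inner loop and its final flush, named for the proofs
def stepA (sn : List String × Int) (column : String) : List String × Int :=
  if column == "." then (sn.1, sn.2 + 1)
  else
    let store := if ¬ sn.2 = 0 then sn.1 ++ [PySem.Int.toStr sn.2] else sn.1
    (store ++ [column], 0)

def flushA (sn : List String × Int) : List String :=
  if ¬ sn.2 = 0 then sn.1 ++ [PySem.Int.toStr sn.2] else sn.1

-- B's encoding of one run
def encB (g : List String) : String :=
  if (g.headD "") == "." then PySem.Int.toStr (g.length : Int) else PySem.Str.join "" g

-- the list of FEN parts A emits for the rest of a row, with k pending empty squares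
def pend (k : Nat) : List String → List String
  | [] => if k = 0 then [] else [PySem.Int.toStr (k : Int)]
  | x :: xs =>
      if x == "." then pend (k + 1) xs
      else (if k = 0 then [] else [PySem.Int.toStr (k : Int)]) ++ x :: pend 0 xs

-- characters of a list of FEN parts
def flat (l : List String) : List Char := (l.map String.toList).flatten

lemma flat_cons (s : String) (l : List String) : flat (s :: l) = s.toList ++ flat l := by
  simp [flat]

lemma foldA_pend (row : List String) : ∀ (store : List String) (k : Nat),
    flushA (row.foldl stepA (store, (k : Int))) = store ++ pend k row := by
  induction row with
  | nil =>
      intro store k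
      simp only [List.foldl_nil, flushA, pend]
      by_cases h : k = 0 <;> simp [h]
  | cons x xs ih =>
      intro store k
      by_cases hx : (x == ".") = true
      · have hstep : stepA (store, (k : Int)) x = (store, ((k + 1 : Nat) : Int)) := by
          simp [stepA, hx]
        rw [List.foldl_cons, hstep, ih store (k + 1)]
        simp [pend, hx]
      · have hstep : stepA (store, (k : Int)) x =
            ((if k = 0 then store else store ++ [PySem.Int.toStr (k : Int)]) ++ [x],
              ((0 : Nat) : Int)) := by
          by_cases h : k = 0
          · simp [stepA, hx, h]
          · simp [stepA, hx, h]
        simp only [List.foldl_cons, hstep, ih, pend, hx]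
        by_cases h : k = 0 <;> simp [h]

lemma pend_nondot_prefix (pre : List String) (hpre : ∀ y ∈ pre, (y == ".") = false) :
    ∀ rest, pend 0 (pre ++ rest) = pre ++ pend 0 rest := by
  induction pre with
  | nil => intro rest; rfl
  | cons y t ih =>
      intro rest
      have hy := hpre y (List.mem_cons_self ..)
      have ht : ∀ z ∈ t, (z == ".") = false := fun z hz => hpre z (List.mem_cons_of_mem _ hz)
      simp only [List.cons_append, pend, hy, Bool.false_eq_true, if_neg, not_false_iff,
        if_pos, List.nil_append, ih ht]

lemma pend_dot_prefix (pre : List String) (hpre : ∀ y ∈ pre, (y == ".") = true) :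
    ∀ rest k, pend k (pre ++ rest) = pend (k + pre.length) rest := by
  induction pre with
  | nil => intro rest k; simp
  | cons y t ih =>
      intro rest k
      have hy := hpre y (List.mem_cons_self ..)
      have ht : ∀ z ∈ t, (z == ".") = true := fun z hz => hpre z (List.mem_cons_of_mem _ hz)
      simp only [List.cons_append, pend, hy, if_pos, ih ht, List.length_cons]
      congr 1
      omega

lemma pend_pos (k : Nat) (hk : k ≠ 0) (rest : List String)
    (h : rest = [] ∨ ∃ z t, rest = z :: t ∧ (z == ".") = false) :
    pend k rest = PySem.Int.toStr (k : Int) :: pend 0 rest := by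
  rcases h with h | ⟨z, t, rfl, hz⟩
  · subst h; simp [pend, hk]
  · simp [pend, hz, hk]

lemma join_empty_flatten (L : List (List Char)) :
    PySem.Chars.join ("".toList) L = L.flatten := by
  induction L with
  | nil => simp [PySem.Chars.join, List.intercalate]
  | cons a L ihL =>
      cases L with
      | nil => simp [PySem.Chars.join, List.intercalate]
      | cons b L =>
          rw [PySem.Chars.join_cons_cons, ihL]
          simp

lemma flat_pend_eq (row : List String) :
    flat (pend 0 row) = flat ((pyRuns row).map encB) := by
  induction row using pyRuns.induct with
  | case1 => simp [pend, pyRuns, flat]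
  | case2 x xs ih =>
      have hruns : pyRuns (x :: xs) =
          (x :: xs.takeWhile (fun y => (y == ".") == (x == "."))) ::
            pyRuns (xs.dropWhile (fun y => (y == ".") == (x == "."))) := by
        rw [pyRuns]
      by_cases hx : (x == ".") = true
      · have hP : (fun y => (y == ".") == (x == ".")) = fun y : String => (y == ".") := by
          funext y; simp [hx]
        rw [hP] at hruns ih
        have htake : ∀ y ∈ xs.takeWhile (fun y : String => (y == ".")), (y == ".") = true := by
          intro y hy
          exact List.mem_takeWhile_imp (p := fun y : String => (y == ".")) hy
        have hdrop : xs.dropWhile (fun y : String => (y == ".")) = [] ∨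
            ∃ z t, xs.dropWhile (fun y : String => (y == ".")) = z :: t ∧ (z == ".") = false := by
          cases hd : xs.dropWhile (fun y : String => (y == ".")) with
          | nil => exact Or.inl rfl
          | cons z t =>
              refine Or.inr ⟨z, t, rfl, ?_⟩
              have hh := List.head?_dropWhile_not (fun y : String => (y == ".")) xs
              rw [hd] at hh
              simpa using hh
        have h2 : pend 0 (x :: xs) =
            PySem.Int.toStr ((1 + (xs.takeWhile (fun y : String => (y == "."))).length : Nat) : Int)
              :: pend 0 (xs.dropWhile (fun y : String => (y == "."))) := by
          have h1 : pend 0 (x :: xs) = pend 1 xs := by simp [pend, hx]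
          rw [h1]
          conv_lhs => rw [← List.takeWhile_append_dropWhile
            (p := fun y : String => (y == ".")) (l := xs)]
          rw [pend_dot_prefix _ htake, pend_pos _ (by omega) _ hdrop]
        rw [h2, hruns, List.map_cons, flat_cons, flat_cons, ih]
        congr 2
        simp only [encB, List.headD_cons, hx, if_pos, List.length_cons]
        congr 1
        push_cast
        ring
      · have hP : (fun y => (y == ".") == (x == ".")) = fun y : String => !(y == ".") := by
          funext y
          simp only [Bool.eq_false_iff.mpr hx]
          cases h : (y == ".") <;> rfl
        rw [hP] at hruns ih
        have htake : ∀ y ∈ xs.takeWhile (fun y : String => !(y == ".")), (y == ".") = false := by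
          intro y hy
          have := List.mem_takeWhile_imp hy
          simpa using this
        have h2 : pend 0 (x :: xs) =
            x :: xs.takeWhile (fun y : String => !(y == ".")) ++
              pend 0 (xs.dropWhile (fun y : String => !(y == "."))) := by
          have h1 : pend 0 (x :: xs) = x :: pend 0 xs := by simp [pend, hx]
          rw [h1]
          conv_lhs => rw [← List.takeWhile_append_dropWhile
            (p := fun y : String => !(y == ".")) (l := xs)]
          rw [pend_nondot_prefix _ htake]
          simp [List.cons_append]
        rw [h2, hruns, List.map_cons, flat_cons]
        have henc : (encB (x :: xs.takeWhile (fun y : String => !(y == ".")))).toList =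
            flat (x :: xs.takeWhile (fun y : String => !(y == "."))) := by
          simp only [encB, List.headD_cons, hx, Bool.false_eq_true, if_neg, not_false_iff]
          rw [PySem.Str.toList_join, join_empty_flatten]
          rfl
        rw [henc, ← ih]
        simp [flat]

lemma join_eq_of_flat_eq (l₁ l₂ : List String) (h : flat l₁ = flat l₂) :
    PySem.Str.join "" l₁ = PySem.Str.join "" l₂ := by
  apply String.toList_inj.mp
  rw [PySem.Str.toList_join, PySem.Str.toList_join, join_empty_flatten, join_empty_flatten]
  exact h

lemma rowA_eq (row : List String) :
    PySem.Str.join "" (flushA (row.foldl stepA ([], 0))) =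
      PySem.Str.join "" ((pyRuns row).map encB) := by
  have h := foldA_pend row [] 0
  rw [show ((0 : Int)) = ((0 : Nat) : Int) from rfl, h]
  exact join_eq_of_flat_eq _ _ (flat_pend_eq row)

lemma foldl_emit {α β : Type} (f : α → β) (l : List α) :
    ∀ acc : List β, l.foldl (fun acc r => acc ++ [f r]) acc = acc ++ l.map f := by
  induction l with
  | nil => intro acc; simp
  | cons x xs ih => intro acc; simp [ih]

-- ===== VERDICT (by name: the statement is the Claim_ definition above) =====
theorem ASCII_to_FEN_spec : Claim_equal_ASCII_to_FEN := by
  intro board _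
  unfold Spec_ASCII_to_FEN ASCII_to_FEN ASCII_to_FEN_alt
  have hbody : (fun (FEN : List String) (row : List String) =>
      let sn := row.foldl (fun (sn : List String × Int) column =>
        if column == "." then (sn.1, sn.2 + 1)
        else
          let store := if ¬ sn.2 = 0 then sn.1 ++ [PySem.Int.toStr sn.2] else sn.1
          (store ++ [column], 0)) ([], 0)
      let store := if ¬ sn.2 = 0 then sn.1 ++ [PySem.Int.toStr sn.2] else sn.1
      FEN ++ [PySem.Str.join "" store]) =
      fun FEN row => FEN ++ [PySem.Str.join "" (flushA (row.foldl stepA ([], 0)))] := by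
    funext FEN row
    rfl
  rw [hbody, foldl_emit (fun row => PySem.Str.join "" (flushA (row.foldl stepA ([], 0)))) board []]
  simp only [List.nil_append]
  congr 1
  apply List.map_congr_left
  intro row _
  rw [rowA_eq]
  rfl
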